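-- pv_equiv track=rewrite | github.com/arian-askari/entity_tasks_deep | deep/dirty_valid_codes/model_2layers.py | get_trec_output_logistic_regression
-- ===== SOURCE A (Python) =====
-- def get_trec_output_logistic_regression(q_id_list, test_TYPES, test_Y, predict_classes):
--     trec_output_str = ""
--     trec_ouput_dict = dict()
--
--     for q_id_test, q_candidate_type, true_predict, predict_class \
--             in zip(q_id_list, test_TYPES, test_Y, predict_classes):
--         # 1
--         query_id = q_id_test
--
--         # 2
--         iter_str = "Q0"
--
--         # 3
--         doc_id = q_candidate_type
--
--         # 4
--         rank_str = "0"  # trec az in estefade nemikone, felan ino nemikhad dorost print konam:)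
--
--         # 5
--         sim_score = None
--         sim_score = str(predict_class[0])  # model is regression
--
--         # 6
--         run_id = "Model_Deep"
--
--         delimeter = "	"
--
--         if query_id not in trec_ouput_dict:
--             trec_ouput_dict[query_id] = [(doc_id, rank_str, sim_score, run_id)]
--         else:
--             trec_ouput_dict[query_id].append((doc_id, rank_str, sim_score, run_id))
--
--     for query_id, detailsList in trec_ouput_dict.items():
--         detailsList_sorted = sorted(detailsList, key=lambda x: x[2], reverse=True)
--         i = 0
--         for detail in detailsList_sorted:
--             doc_id = detail[0]
--             rank_str = str(i)
--             sim_score = detail[2]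
--             run_id = detail[3]
--             trec_output_str += query_id + delimeter + iter_str + delimeter + doc_id + delimeter + rank_str + delimeter + sim_score + delimeter + run_id + "\n"
--             i += 1
--
--     # trec_output_str += query_id + delimeter + iter_str + delimeter + doc_id + delimeter + rank_str + delimeter + sim_score + delimeter + run_id + "\n"
--     return trec_output_str
-- ===== SOURCE B (Python) =====
-- def get_trec_output_logistic_regression(q_id_list, test_TYPES, test_Y, predict_classes):
--     records = [(q, (t, "0", str(p[0]), "Model_Deep"))
--                for q, t, _, p in zip(q_id_list, test_TYPES, test_Y, predict_classes)]
--     lines = []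
--     for q in dict.fromkeys(q for q, _ in records):
--         group = sorted([v for r_q, v in records if r_q == q],
--                        key=lambda v: v[2], reverse=True)
--         for rank, (doc, _, score, run) in enumerate(group):
--             lines.append(q + "\t" + "Q0" + "\t" + doc + "\t" + str(rank)
--                          + "\t" + score + "\t" + run + "\n")
--     return "".join(lines)
-- ===== Notes on version B (the rewrite author's own statement) =====
-- stated objective: simpler
-- what changed: B drops A's dict-of-lists accumulation and its two manual accumulator loops (string += and a hand-kept rank counter): it builds a flat record list in one comprehension, dedups the query ids, and per query uses filter + sorted + enumerate, joining the collected lines at the end.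
import Mathlib
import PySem

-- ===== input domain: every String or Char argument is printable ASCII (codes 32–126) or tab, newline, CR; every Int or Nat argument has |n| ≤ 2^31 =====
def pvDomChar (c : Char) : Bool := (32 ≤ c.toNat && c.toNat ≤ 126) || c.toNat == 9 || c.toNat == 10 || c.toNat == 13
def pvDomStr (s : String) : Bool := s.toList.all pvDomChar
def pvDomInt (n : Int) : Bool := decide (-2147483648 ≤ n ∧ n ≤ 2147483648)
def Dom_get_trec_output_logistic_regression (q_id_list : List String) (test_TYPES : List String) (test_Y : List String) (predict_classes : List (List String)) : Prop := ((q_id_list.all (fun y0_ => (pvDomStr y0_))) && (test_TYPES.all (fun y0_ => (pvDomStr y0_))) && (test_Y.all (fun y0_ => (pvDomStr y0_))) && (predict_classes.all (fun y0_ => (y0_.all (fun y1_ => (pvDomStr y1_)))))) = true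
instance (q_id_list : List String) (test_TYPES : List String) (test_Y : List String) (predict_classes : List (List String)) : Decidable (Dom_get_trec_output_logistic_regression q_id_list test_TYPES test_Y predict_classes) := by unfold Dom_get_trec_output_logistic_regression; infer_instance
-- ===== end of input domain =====

-- B replaces A's dict-of-lists accumulation and manual string/counter loops by a dedup of the
-- query ids plus a per-query filter, enumerate and join (objective: simpler; return value only).

-- ===== PORT A =====
-- literal transliteration of A: build a dict query_id -> list of detail tuples, then for each
-- item sort by the score string descending and append one line per detail with a manual counter.
def get_trec_output_logistic_regression (q_id_list : List String) (test_TYPES : List String) (test_Y : List String) (predict_classes : List (List String)) : String :=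
  let rows := q_id_list.zip (test_TYPES.zip (test_Y.zip predict_classes))
  let d : PySem.Dict String (List (String × String × String × String)) :=
    rows.foldl (fun d row =>
      let query_id := row.1
      let doc_id := row.2.1
      -- sim_score = str(predict_class[0]); pyGet? = none is an IndexError, excluded by Pre_
      let sim_score := (PySem.List.pyGet? row.2.2.2 0).getD ""
      let run_id := "Model_Deep"
      if (d.contains query_id) = false then
        d.insert query_id [(doc_id, "0", sim_score, run_id)]
      else
        d.modify query_id [] (fun l => l ++ [(doc_id, "0", sim_score, run_id)]))
      PySem.Dict.empty
  d.items.foldl (fun acc it =>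
    let detailsList_sorted := PySem.List.sorted it.2 (fun x => x.2.2.1) true
    (detailsList_sorted.foldl (fun st detail =>
        (st.1 ++ (it.1 ++ "\t" ++ "Q0" ++ "\t" ++ detail.1 ++ "\t" ++ PySem.Int.toStr st.2 ++ "\t" ++ detail.2.2.1 ++ "\t" ++ detail.2.2.2 ++ "\n"),
         st.2 + 1))
      (acc, (0 : Int))).1) ""

-- ===== PORT B =====
-- literal transliteration of B: flat record list, dedup of the query ids, per-query filter +
-- sort + enumerate, lines joined at the end.
def get_trec_output_logistic_regression_alt (q_id_list : List String) (test_TYPES : List String) (test_Y : List String) (predict_classes : List (List String)) : String :=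
  let records := (q_id_list.zip (test_TYPES.zip (test_Y.zip predict_classes))).map
    (fun row => (row.1, (row.2.1, "0", (PySem.List.pyGet? row.2.2.2 0).getD "", "Model_Deep")))
  let lines := (PySem.List.dedup (records.map (fun r => r.1))).flatMap (fun q =>
    let group := PySem.List.sorted ((records.filter (fun r => r.1 == q)).map (fun r => r.2)) (fun v => v.2.2.1) true
    (PySem.List.enumerate group).map (fun p =>
      q ++ "\t" ++ "Q0" ++ "\t" ++ p.2.1 ++ "\t" ++ PySem.Int.toStr p.1 ++ "\t" ++ p.2.2.2.1 ++ "\t" ++ p.2.2.2.2 ++ "\n"))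
  PySem.Str.join "" lines

-- ===== PRECONDITION & SPEC =====
-- Pre_ excludes exactly the inputs where the Python A raises IndexError: a row inside the zip
-- whose predict_class list is empty (B raises there too).
def Pre_get_trec_output_logistic_regression (q_id_list : List String) (test_TYPES : List String) (test_Y : List String) (predict_classes : List (List String)) : Prop :=
  ∀ pc ∈ predict_classes.take (min q_id_list.length (min test_TYPES.length test_Y.length)), pc ≠ []
instance (q_id_list : List String) (test_TYPES : List String) (test_Y : List String) (predict_classes : List (List String)) : Decidable (Pre_get_trec_output_logistic_regression q_id_list test_TYPES test_Y predict_classes) := by unfold Pre_get_trec_output_logistic_regression; infer_instance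

def pvWitness_get_trec_output_logistic_regression : List String × List String × List String × List (List String) :=
  (["q1", "q2", "q1"], ["dA", "dB", "dC"], ["0", "1", "0"], [["0.5"], ["0.3"], ["0.7"]])

def Spec_get_trec_output_logistic_regression (q_id_list : List String) (test_TYPES : List String) (test_Y : List String) (predict_classes : List (List String)) (out : String) : Prop := out = get_trec_output_logistic_regression_alt q_id_list test_TYPES test_Y predict_classes
instance (q_id_list : List String) (test_TYPES : List String) (test_Y : List String) (predict_classes : List (List String)) (out : String) : Decidable (Spec_get_trec_output_logistic_regression q_id_list test_TYPES test_Y predict_classes out) := by unfold Spec_get_trec_output_logistic_regression; infer_instance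

-- ===== CLAIM (what is proved, stated in full; the proofs are below) =====
def Claim_equal_get_trec_output_logistic_regression : Prop := ∀ (q_id_list : List String) (test_TYPES : List String) (test_Y : List String) (predict_classes : List (List String)), Dom_get_trec_output_logistic_regression q_id_list test_TYPES test_Y predict_classes → Pre_get_trec_output_logistic_regression q_id_list test_TYPES test_Y predict_classes → Spec_get_trec_output_logistic_regression q_id_list test_TYPES test_Y predict_classes (get_trec_output_logistic_regression q_id_list test_TYPES test_Y predict_classes)

-- ===== LEMMAS AND PROOFS =====

-- "".join distributes over cons / append (on the list-of-chars level it is List.intercalate []).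
lemma pvJoin_nil_cons (x : String) (l : List String) :
    PySem.Str.join "" (x :: l) = x ++ PySem.Str.join "" l := by
  apply String.toList_inj.mp
  simp [PySem.Str.join, PySem.Chars.join]
  have : ∀ (y : List Char) (m : List (List Char)),
      List.intercalate [] (y :: m) = y ++ List.intercalate [] m := by
    intro y m
    simp [List.intercalate]
    induction m with
    | nil => simp
    | cons h t ih => simp_all [List.intersperse]
  rw [this]

lemma pvJoin_nil_append (a b : List String) :
    PySem.Str.join "" (a ++ b) = PySem.Str.join "" a ++ PySem.Str.join "" b := by
  induction a with
  | nil => simp [show PySem.Str.join "" [] = "" from rfl]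
  | cons x xs ih => simp [pvJoin_nil_cons, ih, String.append_assoc]

-- A's string-plus-counter inner loop is "".join over the enumerated list.
lemma pvFoldl_counter_join {α : Type} (l : List α) (g : Int → α → String) (acc : String) (i : Int) :
    (l.foldl (fun st det => (st.1 ++ g st.2 det, st.2 + 1)) (acc, i)).1
      = acc ++ PySem.Str.join "" ((PySem.List.enumerate l i).map (fun p => g p.1 p.2)) := by
  induction l generalizing acc i with
  | nil => simp [show PySem.Str.join "" [] = "" from rfl]
  | cons x xs ih =>
      simp [PySem.List.enumerate_cons, ih, pvJoin_nil_cons, String.append_assoc]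

-- A's outer string-accumulating loop is "".join over the mapped list.
lemma pvFoldl_append_join {α : Type} (l : List α) (f : α → String) (s : String) :
    l.foldl (fun acc x => acc ++ f x) s = s ++ PySem.Str.join "" (l.map f) := by
  induction l generalizing s with
  | nil => simp [show PySem.Str.join "" [] = "" from rfl]
  | cons x xs ih => simp [ih, pvJoin_nil_cons, String.append_assoc]

-- join of joins is join of the flattened list.
lemma pvJoin_join {κ : Type} (l : List κ) (f : κ → List String) :
    PySem.Str.join "" (l.map (fun k => PySem.Str.join "" (f k))) = PySem.Str.join "" (l.flatMap f) := by
  induction l with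
  | nil => rfl
  | cons x xs ih => simp [List.flatMap_cons, pvJoin_nil_cons, pvJoin_nil_append, ih]

-- modify on a missing key is insert of f applied to the default.
lemma pvModify_of_not_contains {κ ν : Type} [BEq κ] [LawfulBEq κ]
    (d : PySem.Dict κ ν) (k : κ) (d0 : ν) (f : ν → ν) (h : d.contains k = false) :
    d.modify k d0 f = d.insert k (f d0) := by
  have h2 : d.get? k = none := by
    rw [PySem.Dict.contains_eq_isSome_get?] at h
    cases hh : d.get? k <;> simp [hh] at h ⊢
  simp [PySem.Dict.modify, PySem.Dict.insert, PySem.Dict.getD_eq_get?_getD, h, h2]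

-- A's branchy dict update is exactly an unconditional modify-append.
lemma pvBranch_eq_modify {κ ν : Type} [BEq κ] [LawfulBEq κ]
    (d : PySem.Dict κ (List ν)) (k : κ) (v : ν) :
    (if (d.contains k) = false then d.insert k [v] else d.modify k [] (fun l => l ++ [v]))
      = d.modify k [] (fun l => l ++ [v]) := by
  by_cases h : d.contains k = false
  · simp [h, pvModify_of_not_contains d k [] _ h]
  · simp [h]

-- ===== VERDICT (by name: the statement is the Claim_ definition above) =====
theorem get_trec_output_logistic_regression_spec : Claim_equal_get_trec_output_logistic_regression := by
  intro q_id_list test_TYPES test_Y predict_classes _ _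
  unfold Spec_get_trec_output_logistic_regression
  unfold get_trec_output_logistic_regression get_trec_output_logistic_regression_alt
  simp only [pvBranch_eq_modify]
  set rows := q_id_list.zip (test_TYPES.zip (test_Y.zip predict_classes)) with hrows
  set recs := rows.map (fun row => (row.1, row.2.1, "0", (PySem.List.pyGet? row.2.2.2 0).getD "", "Model_Deep")) with hrecs
  have hd : rows.foldl (fun d row => d.modify row.1 [] fun l => l ++ [(row.2.1, "0", (PySem.List.pyGet? row.2.2.2 0).getD "", "Model_Deep")]) PySem.Dict.empty
      = recs.foldl (fun d p => d.modify p.1 [] fun l => l ++ [p.2]) PySem.Dict.empty := by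
    rw [hrecs, List.foldl_map]
  rw [hd]
  clear hd hrows hrecs
  clear_value rows recs
  have hnd : (recs.foldl (fun d p => d.modify p.1 [] fun l => l ++ [p.2]) PySem.Dict.empty).keys.Nodup := by
    have := PySem.Dict.nodup_keys_foldl_modify_key recs (fun p => p.1) [] (fun _ p => fun l => l ++ [p.2]) PySem.Dict.empty
    simp at this
    exact this
  rw [PySem.Dict.items_eq_map_keys _ hnd []]
  have hkeys : (recs.foldl (fun d p => d.modify p.1 [] fun l => l ++ [p.2]) PySem.Dict.empty).keys
      = PySem.Set.ofList (recs.map (fun p => p.1)) := by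
    have := PySem.Dict.keys_foldl_modify_key recs (fun p => p.1) [] (fun _ p => fun l => l ++ [p.2]) PySem.Dict.empty
    simpa using this
  have hgetD : ∀ c, (recs.foldl (fun d p => d.modify p.1 [] fun l => l ++ [p.2]) PySem.Dict.empty).getD c []
      = (recs.filter (fun p => p.1 == c)).map (fun p => p.2) := by
    intro c
    simpa using PySem.Dict.getD_foldl_modify_append recs PySem.Dict.empty c
  simp only [hkeys, hgetD]
  have hbody : (fun (acc : String) (it : String × List (String × String × String × String)) =>
      (List.foldl (fun st detail =>
          (st.1 ++ (it.1 ++ "\t" ++ "Q0" ++ "\t" ++ detail.1 ++ "\t" ++ PySem.Int.toStr st.2 ++ "\t" ++ detail.2.2.1 ++ "\t" ++ detail.2.2.2 ++ "\n"),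
           st.2 + 1))
        (acc, (0 : Int)) (PySem.List.sorted it.2 (fun x => x.2.2.1) true)).1)
      = (fun acc it => acc ++ PySem.Str.join ""
          ((PySem.List.enumerate (PySem.List.sorted it.2 (fun x => x.2.2.1) true) 0).map (fun p =>
            it.1 ++ "\t" ++ "Q0" ++ "\t" ++ p.2.1 ++ "\t" ++ PySem.Int.toStr p.1 ++ "\t" ++ p.2.2.2.1 ++ "\t" ++ p.2.2.2.2 ++ "\n"))) := by
    funext acc it
    simpa using pvFoldl_counter_join (PySem.List.sorted it.2 (fun x => x.2.2.1) true) (fun i det => it.1 ++ "\t" ++ "Q0" ++ "\t" ++ det.1 ++ "\t" ++ PySem.Int.toStr i ++ "\t" ++ det.2.2.1 ++ "\t" ++ det.2.2.2 ++ "\n") acc 0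
  rw [hbody]
  rw [pvFoldl_append_join]
  simp only [List.map_map, Function.comp_def, PySem.List.dedup_eq_ofList]
  rw [pvJoin_join]
  simp
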